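-- pv_equiv track=rewrite | github.com/QuiqueCrespo/py-apperception | code/Solve.py | get_first_n_int_pairs
-- ===== SOURCE A (Python) =====
-- from itertools import accumulate, product, count
-- from typing import List, Tuple, Union, Iterator, Optional
--
-- const_num_templates_per_type = 100
--
-- def get_first_n_int_pairs(n: int) -> List[Tuple[int, int]]:
--     """
--     Generate the first n "units" of (count, types) pairs as in Haskell implementation.
--     """
--     result = []
--     total = 0
--     for i, y in zip(count(1), count(0)):
--         block = const_num_templates_per_type * i
--         if total + block >= n:
--             diff = n - total
--             if diff > 0:
--                 result.append((diff, y))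
--             break
--         result.append((block, y))
--         total += block
--     return result
-- ===== SOURCE B (Python) =====
-- # Closed-form construction: solve the quadratic cumulative bound with an integer
-- # square root instead of scanning blocks with a running total.
--
-- def _isqrt(x):
--     """Integer sqrt by binary search (math is not imported by the module)."""
--     lo, hi = 0, x + 1
--     while hi - lo > 1:
--         mid = (lo + hi) // 2
--         if mid * mid <= x:
--             lo = mid
--         else:
--             hi = mid
--     return lo
--
-- def get_first_n_int_pairs(n):
--     if n <= 0:
--         return []
--     m = (n - 1) // 50
--     k = (_isqrt(4 * m + 1) - 1) // 2
--     result = [(100 * j, j - 1) for j in range(1, k + 1)]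
--     result.append((n - 50 * k * (k + 1), k))
--     return result
-- ===== Notes on version B (the rewrite author's own statement) =====
-- stated objective: alternative
-- what changed: Replaces the scan-and-accumulate loop over blocks by a closed form: the number k of full blocks is recovered from the quadratic cumulative sum 50*j*(j+1) < n via an integer square root (hand-rolled binary search, since math is not imported), then the list is built directly as [(100*j, j-1) for j in range(1,k+1)] plus the remainder pair.
import Mathlib
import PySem

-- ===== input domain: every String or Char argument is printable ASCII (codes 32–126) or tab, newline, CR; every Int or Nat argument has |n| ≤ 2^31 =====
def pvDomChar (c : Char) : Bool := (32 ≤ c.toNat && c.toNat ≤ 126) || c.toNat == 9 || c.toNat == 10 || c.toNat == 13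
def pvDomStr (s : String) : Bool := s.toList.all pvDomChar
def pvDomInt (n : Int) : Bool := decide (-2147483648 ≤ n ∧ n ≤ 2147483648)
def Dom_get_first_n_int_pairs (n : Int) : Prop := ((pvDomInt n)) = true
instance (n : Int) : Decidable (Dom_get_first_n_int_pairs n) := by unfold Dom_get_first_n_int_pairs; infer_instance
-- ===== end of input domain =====

-- B replaces A's scan-and-accumulate loop by a closed form: the number of full
-- blocks is recovered from the quadratic cumulative sum with an integer square
-- root (objective: alternative algorithm).

-- ===== PORT A =====
-- A's unbounded `for i, y in zip(count(1), count(0))` with break, as structural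
-- recursion; `i` here is A's y (so A's i = i+1, block = 100*(i+1)).
def pvLoopA (n : Int) (i : Nat) (total : Int) (result : List (Int × Int)) :
    List (Int × Int) :=
  let block : Int := 100 * ((i : Int) + 1)
  if n ≤ total + block then
    if 0 < n - total then result ++ [(n - total, (i : Int))] else result
  else
    pvLoopA n (i + 1) (total + block) (result ++ [(block, (i : Int))])
termination_by (n - total).toNat
decreasing_by
  rename_i h
  simp only [not_le] at h
  omega

def get_first_n_int_pairs (n : Int) : List (Int × Int) := pvLoopA n 0 0 []

-- ===== PORT B =====
-- Source B's `_isqrt`: binary search on [lo, hi); inputs here are nonnegative ints,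
-- carried as Nat.
def pvBs (x lo hi : Nat) : Nat :=
  if hi - lo > 1 then
    let mid := (lo + hi) / 2
    if mid * mid ≤ x then pvBs x mid hi else pvBs x lo mid
  else lo
termination_by hi - lo
decreasing_by all_goals omega

def pvIsqrt (x : Nat) : Nat := pvBs x 0 (x + 1)

def get_first_n_int_pairs_alt (n : Int) : List (Int × Int) :=
  if n ≤ 0 then []
  else
    -- (n - 1) // 50 : n ≥ 1 here, so Python's floordiv is plain Nat division
    let m : Nat := (n - 1).toNat / 50
    let k : Nat := (pvIsqrt (4 * m + 1) - 1) / 2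
    ((PySem.List.pyRange 1 ((k : Int) + 1) 1).map (fun j => (100 * j, j - 1)))
      ++ [(n - 50 * (k : Int) * ((k : Int) + 1), (k : Int))]

-- ===== PRECONDITION & SPEC =====
def Spec_get_first_n_int_pairs (n : Int) (out : List (Int × Int)) : Prop := out = get_first_n_int_pairs_alt n
instance (n : Int) (out : List (Int × Int)) : Decidable (Spec_get_first_n_int_pairs n out) := by unfold Spec_get_first_n_int_pairs; infer_instance

-- ===== CLAIM (what is proved, stated in full; the proofs are below) =====
def Claim_equal_get_first_n_int_pairs : Prop := ∀ (n : Int), Dom_get_first_n_int_pairs n → Spec_get_first_n_int_pairs n (get_first_n_int_pairs n)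

-- ===== LEMMAS AND PROOFS =====

-- binary-search invariant: result r satisfies r*r ≤ x < (r+1)*(r+1)
theorem pvBs_spec (x lo hi : Nat) (hlo : lo * lo ≤ x) (hhi : x < hi * hi)
    (hlt : lo < hi) :
    pvBs x lo hi * pvBs x lo hi ≤ x ∧ x < (pvBs x lo hi + 1) * (pvBs x lo hi + 1) := by
  fun_induction pvBs x lo hi with
  | case1 lo hi h mid hle ih => exact ih hle hhi (by omega)
  | case2 lo hi h mid hle ih => exact ih hlo (by omega) (by omega)
  | case3 lo hi h =>
    refine ⟨hlo, ?_⟩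
    have : hi = lo + 1 := by omega
    simpa [this] using hhi

theorem pvIsqrt_spec (x : Nat) :
    pvIsqrt x * pvIsqrt x ≤ x ∧ x < (pvIsqrt x + 1) * (pvIsqrt x + 1) := by
  have := pvBs_spec x 0 (x + 1) (by omega) (by nlinarith) (by omega)
  simpa [pvIsqrt] using this

-- the k computed by B is the largest j with j*(j+1) ≤ m
theorem k_char (m k : Nat) (hk : k = (pvIsqrt (4 * m + 1) - 1) / 2) :
    k * (k + 1) ≤ m ∧ m < (k + 1) * (k + 2) := by
  obtain ⟨h1, h2⟩ := pvIsqrt_spec (4 * m + 1)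
  set r := pvIsqrt (4 * m + 1) with hr
  have hr1 : 1 ≤ r := by nlinarith [h2]
  have hb : 2 * k + 1 ≤ r ∧ r ≤ 2 * k + 2 := by omega
  constructor
  · nlinarith [hb.1, h1]
  · nlinarith [hb.2, h2]

-- the full-block suffix from index i (blocks i+1 .. K, 0-based types i .. K-1)
def fullList (i K : Nat) : List (Int × Int) :=
  (List.range (K - i)).map
    (fun t : Nat => (100 * ((i : Int) + (t : Int) + 1), (i : Int) + (t : Int)))

theorem fullList_cons (i K : Nat) (h : i < K) :
    fullList i K = (100 * ((i : Int) + 1), (i : Int)) :: fullList (i + 1) K := by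
  unfold fullList
  have hKi : K - i = (K - (i + 1)) + 1 := by omega
  rw [hKi, List.range_succ_eq_map, List.map_cons, List.map_map]
  refine congrArg₂ _ (by norm_num) ?_
  apply List.map_congr_left
  intro t _
  simp only [Function.comp_apply, Prod.mk.injEq]
  push_cast
  constructor <;> ring

theorem loop_lemma (n : Int) (K : Nat)
    (hlo : 50 * (K : Int) * ((K : Int) + 1) < n)
    (hhi : n ≤ 50 * ((K : Int) + 1) * ((K : Int) + 2)) :
    ∀ (d i : Nat) (acc : List (Int × Int)), K - i = d → i ≤ K →
      pvLoopA n i (50 * (i : Int) * ((i : Int) + 1)) acc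
        = acc ++ fullList i K ++ [(n - 50 * (K : Int) * ((K : Int) + 1), (K : Int))] := by
  intro d
  induction d with
  | zero =>
    intro i acc hd hle
    have hiK : i = K := by omega
    subst hiK
    rw [pvLoopA]
    have hstop : n ≤ 50 * (i : Int) * ((i : Int) + 1) + 100 * ((i : Int) + 1) := by
      have : (50 : Int) * ((i : Int) + 1) * ((i : Int) + 2)
          = 50 * (i : Int) * ((i : Int) + 1) + 100 * ((i : Int) + 1) := by ring
      omega
    rw [if_pos hstop, if_pos (by omega)]
    simp [fullList]
  | succ d ih =>
    intro i acc hd hle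
    have hiK : i < K := by omega
    rw [pvLoopA]
    have hgo : ¬ n ≤ 50 * (i : Int) * ((i : Int) + 1) + 100 * ((i : Int) + 1) := by
      have hmono : ((i : Int) + 1) * ((i : Int) + 2) ≤ (K : Int) * ((K : Int) + 1) := by
        exact_mod_cast Nat.mul_le_mul (show i + 1 ≤ K by omega) (show i + 2 ≤ K + 1 by omega)
      nlinarith
    rw [if_neg hgo]
    have htot : 50 * (i : Int) * ((i : Int) + 1) + 100 * ((i : Int) + 1)
        = 50 * ((i + 1 : Nat) : Int) * (((i + 1 : Nat) : Int) + 1) := by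
      push_cast; ring
    rw [htot, ih (i + 1) _ (by omega) (by omega), fullList_cons i K hiK]
    simp

-- B's comprehension over range(1, k+1) equals the full-block suffix from 0
theorem pyRange_map_eq_fullList (k : Nat) :
    (PySem.List.pyRange 1 ((k : Int) + 1) 1).map
        (fun j => (100 * j, j - 1)) = fullList 0 k := by
  rw [PySem.List.pyRange_one]
  unfold fullList
  have hkk : ((k : Int) + 1 - 1).toNat = k := by omega
  rw [hkk, List.map_map]
  simp only [Nat.sub_zero]
  apply List.map_congr_left
  intro t _
  simp only [Function.comp_apply, Prod.mk.injEq]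
  push_cast
  constructor <;> ring

-- the n > 0 case, with m and k named
theorem main_pos (n : Int) (m K : Nat) (hn : 0 < n)
    (hm : m = (n - 1).toNat / 50) (hK : K = (pvIsqrt (4 * m + 1) - 1) / 2) :
    pvLoopA n 0 0 []
      = ((PySem.List.pyRange 1 ((K : Int) + 1) 1).map (fun j => (100 * j, j - 1)))
        ++ [(n - 50 * (K : Int) * ((K : Int) + 1), (K : Int))] := by
  obtain ⟨h1, h2⟩ := k_char m K hK
  have hdiv : 50 * m ≤ (n - 1).toNat ∧ (n - 1).toNat < 50 * m + 50 := by
    constructor <;> omega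
  have hN : ((n - 1).toNat : Int) = n - 1 := by omega
  have hlo : 50 * (K : Int) * ((K : Int) + 1) < n := by
    have h50 : ((50 * (K * (K + 1)) : Nat) : Int) ≤ ((50 * m : Nat) : Int) := by
      exact_mod_cast Nat.mul_le_mul_left 50 h1
    push_cast at h50
    nlinarith
  have hhi : n ≤ 50 * ((K : Int) + 1) * ((K : Int) + 2) := by
    have h50 : ((n - 1).toNat : Int) < ((50 * ((K + 1) * (K + 2)) : Nat) : Int) := by
      exact_mod_cast show (n - 1).toNat < 50 * ((K + 1) * (K + 2)) by omega
    push_cast at h50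
    nlinarith
  have hA := loop_lemma n K hlo hhi K 0 [] (by omega) (by omega)
  simp only [Nat.cast_zero, mul_zero, zero_mul, List.nil_append] at hA
  rw [hA, pyRange_map_eq_fullList]

-- ===== VERDICT (by name: the statement is the Claim_ definition above) =====
theorem get_first_n_int_pairs_spec : Claim_equal_get_first_n_int_pairs := by
  intro n _
  unfold Spec_get_first_n_int_pairs get_first_n_int_pairs
  by_cases hn : n ≤ 0
  · simp only [get_first_n_int_pairs_alt, if_pos hn]
    rw [pvLoopA]
    simp only [Nat.cast_zero]
    rw [if_pos (by omega), if_neg (by omega)]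
  · simp only [get_first_n_int_pairs_alt, if_neg hn]
    exact main_pos n _ _ (by omega) rfl rfl
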